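-- pv_equiv track=rewrite | github.com/jjepaah/KoneistajanLaskuri | Koneistajan laskuri.py | inputTarkistus
-- ===== SOURCE A (Python) =====
-- def inputTarkistus(teksti):
--     tulos = "";
--     p = 0;
--     for c in teksti:
--         if c == "," or c == ".":
--             if p == 0:
--                 p = 1;
--                 tulos += ".";
--         else:
--             tulos += c;
--     return tulos;
-- ===== SOURCE B (Python) =====
-- def inputTarkistus(teksti):
--     i = next((k for k, c in enumerate(teksti) if c == "," or c == "."), None)
--     if i is None:
--         return teksti
--     return teksti[:i] + "." + teksti[i+1:].replace(",", "").replace(".", "")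
-- ===== Notes on version B (the rewrite author's own statement) =====
-- stated objective: idiomatic
-- what changed: Replaces the stateful char-by-char accumulator loop with a find-first-separator index, then slice and bulk-strip: the prefix, a dot, and the suffix with all remaining separators removed.
import Mathlib
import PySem

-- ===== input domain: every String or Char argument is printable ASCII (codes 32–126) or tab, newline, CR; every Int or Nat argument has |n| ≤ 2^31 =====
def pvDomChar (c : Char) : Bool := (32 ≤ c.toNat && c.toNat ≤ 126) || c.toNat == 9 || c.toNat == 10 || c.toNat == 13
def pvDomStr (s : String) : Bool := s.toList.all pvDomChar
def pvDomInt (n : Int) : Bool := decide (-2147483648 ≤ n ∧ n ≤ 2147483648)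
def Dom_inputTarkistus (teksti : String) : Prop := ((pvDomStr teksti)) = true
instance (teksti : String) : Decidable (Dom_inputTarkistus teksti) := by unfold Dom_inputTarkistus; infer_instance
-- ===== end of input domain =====

-- B replaces A's stateful char-by-char loop by find-first-separator, then slice and bulk
-- strip of the remaining separators (objective: idiomatic); return values agree on every string.

-- ===== PORT A =====
-- the body of A's for-loop: state (tulos, p)
def pvStepA (s : List Char × Nat) (c : Char) : List Char × Nat :=
  if c = ',' ∨ c = '.' then (if s.2 = 0 then (s.1 ++ ['.'], 1) else s)
  else (s.1 ++ [c], s.2)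

def inputTarkistus (teksti : String) : String :=
  String.ofList (teksti.toList.foldl pvStepA ([], 0)).1

-- ===== PORT B =====
-- next(… enumerate …) finding the first separator index → List.findIdx?;
-- teksti[:i] / teksti[i+1:] with i ≥ 0 → take / drop (exact for nonnegative in-range slices);
-- str.replace(sep, "") removing single characters → filter (exact: deletes every occurrence).
def inputTarkistus_alt (teksti : String) : String :=
  match teksti.toList.findIdx? (fun c => c == ',' || c == '.') with
  | none => teksti
  | some i =>
      String.ofList (teksti.toList.take i ++ ['.'] ++
        (((teksti.toList.drop (i + 1)).filter (fun c => c ≠ ',')).filter (fun c => c ≠ '.')))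

-- ===== PRECONDITION & SPEC =====
def Spec_inputTarkistus (teksti : String) (out : String) : Prop := out = inputTarkistus_alt teksti
instance (teksti : String) (out : String) : Decidable (Spec_inputTarkistus teksti out) := by unfold Spec_inputTarkistus; infer_instance

-- ===== CLAIM (what is proved, stated in full; the proofs are below) =====
def Claim_equal_inputTarkistus : Prop := ∀ (teksti : String), Dom_inputTarkistus teksti → Spec_inputTarkistus teksti (inputTarkistus teksti)

-- ===== LEMMAS AND PROOFS =====

-- once p = 1, the loop just copies every non-separator character
theorem pvFoldA_one (cs : List Char) : ∀ acc : List Char,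
    (cs.foldl pvStepA (acc, 1)).1
      = acc ++ ((cs.filter (fun c => c ≠ ',')).filter (fun c => c ≠ '.')) := by
  induction cs with
  | nil => intro acc; simp
  | cons c cs ih =>
    intro acc
    by_cases h : c = ',' ∨ c = '.'
    · have : pvStepA (acc, 1) c = (acc, 1) := by simp [pvStepA, h]
      rcases h with h | h <;> subst h <;>
        rw [List.foldl_cons, this, ih] <;> simp
    · push Not at h
      have : pvStepA (acc, 1) c = (acc ++ [c], 1) := by simp [pvStepA, h.1, h.2]
      simp [List.foldl_cons, this, ih, h.1, h.2]

-- with p = 0, the loop computes B's find-slice-strip decomposition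
theorem pvFoldA_zero (cs : List Char) : ∀ acc : List Char,
    (cs.foldl pvStepA (acc, 0)).1
      = match cs.findIdx? (fun c => c == ',' || c == '.') with
        | none => acc ++ cs
        | some i => acc ++ cs.take i ++ ['.'] ++
            (((cs.drop (i + 1)).filter (fun c => c ≠ ',')).filter (fun c => c ≠ '.')) := by
  induction cs with
  | nil => intro acc; simp
  | cons c cs ih =>
    intro acc
    by_cases h : c = ',' ∨ c = '.'
    · have hs : pvStepA (acc, 0) c = (acc ++ ['.'], 1) := by simp [pvStepA, h]
      have hf : (c :: cs).findIdx? (fun c => c == ',' || c == '.') = some 0 := by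
        rcases h with h | h <;> simp [List.findIdx?_cons, h]
      simp [List.foldl_cons, hs, pvFoldA_one, hf]
    · push Not at h
      have hs : pvStepA (acc, 0) c = (acc ++ [c], 0) := by simp [pvStepA, h.1, h.2]
      have hf : (c :: cs).findIdx? (fun c => c == ',' || c == '.')
          = (cs.findIdx? (fun c => c == ',' || c == '.')).map (· + 1) := by
        simp [List.findIdx?_cons, h.1, h.2]
      rw [List.foldl_cons, hs, ih, hf]
      cases cs.findIdx? (fun c => c == ',' || c == '.') with
      | none => simp
      | some i => simp [List.take_succ_cons, List.drop_succ_cons]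

-- ===== VERDICT (by name: the statement is the Claim_ definition above) =====
theorem inputTarkistus_spec : Claim_equal_inputTarkistus := by
  intro teksti _
  unfold Spec_inputTarkistus inputTarkistus inputTarkistus_alt
  rw [pvFoldA_zero]
  cases h : teksti.toList.findIdx? (fun c => c == ',' || c == '.') with
  | none => simp [String.ofList]
  | some i => simp
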